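-- pv_equiv track=rewrite | github.com/NMGRL/pychron | pychron/core/utils.py | alpha_to_int
-- ===== SOURCE A (Python) =====
-- import string
--
-- BASE = 26
--
-- A_UPPERCASE = ord("A")
--
-- def alpha_to_int(l):
--     if not l:
--         return
--
--     # if l is digits just cast to int
--     if all(li in string.digits for li in l):
--         return int(l) - 1
--
--     s = sum(
--         (ord(li) - A_UPPERCASE + 1) * BASE**i
--         for i, li in enumerate(reversed(l.upper()))
--     )
--
--     return s - 1
-- ===== SOURCE B (Python) =====
-- import string
--
--
-- def alpha_to_int(l):
--     if not l:
--         return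
--
--     if all(li in string.digits for li in l):
--         return int(l) - 1
--
--     acc = 0
--     for c in l.upper():
--         acc = acc * 26 + (ord(c) - ord("A") + 1)
--     return acc - 1
-- ===== Notes on version B (the rewrite author's own statement) =====
-- stated objective: faster
-- what changed: The alpha branch's reversed-enumerate sum of (ord(c)-64)*26**i power terms is replaced by a forward Horner accumulation acc = acc*26 + (ord(c)-64); empty-guard and digit branch are kept.
import Mathlib
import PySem

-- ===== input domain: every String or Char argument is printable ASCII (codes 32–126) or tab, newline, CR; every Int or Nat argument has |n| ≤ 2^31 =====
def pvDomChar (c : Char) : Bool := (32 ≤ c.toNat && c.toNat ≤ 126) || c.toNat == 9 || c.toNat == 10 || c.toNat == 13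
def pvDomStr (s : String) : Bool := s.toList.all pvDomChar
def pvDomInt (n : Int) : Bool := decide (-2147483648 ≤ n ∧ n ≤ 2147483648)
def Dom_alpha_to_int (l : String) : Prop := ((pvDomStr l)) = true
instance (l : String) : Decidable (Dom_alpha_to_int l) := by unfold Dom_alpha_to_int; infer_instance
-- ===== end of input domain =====

-- B replaces A's reversed-enumerate power-weighted sum by a forward Horner accumulation; same value everywhere.

-- ===== PORT A =====
-- ord(li) - A_UPPERCASE + 1
def pvOrdVal (c : Char) : Int := (c.toNat : Int) - 65 + 1

def alpha_to_int (l : String) : Option Int :=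
  if l.toList = [] then none
  else if l.toList.all (fun c => decide ('0' ≤ c) && decide (c ≤ '9')) then
    -- int(l) - 1 ; int(l) cannot raise here (nonempty, all digits)
    (PySem.Int.ofStr? l).map (fun n => n - 1)
  else
    let s := ((PySem.List.enumerate ((PySem.Str.upper l).toList.reverse) 0).map
      (fun p => pvOrdVal p.2 * 26 ^ p.1.toNat)).sum
    some (s - 1)

-- ===== PORT B =====
def alpha_to_int_alt (l : String) : Option Int :=
  if l.toList = [] then none
  else if l.toList.all (fun c => decide ('0' ≤ c) && decide (c ≤ '9')) then
    (PySem.Int.ofStr? l).map (fun n => n - 1)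
  else
    some ((PySem.Str.upper l).toList.foldl
      (fun a c => a * 26 + ((c.toNat : Int) - 65 + 1)) 0 - 1)

-- ===== PRECONDITION & SPEC =====
def Spec_alpha_to_int (l : String) (out : Option Int) : Prop := out = alpha_to_int_alt l
instance (l : String) (out : Option Int) : Decidable (Spec_alpha_to_int l out) := by unfold Spec_alpha_to_int; infer_instance

-- ===== CLAIM (what is proved, stated in full; the proofs are below) =====
def Claim_equal_alpha_to_int : Prop := ∀ (l : String), Dom_alpha_to_int l → Spec_alpha_to_int l (alpha_to_int l)

-- ===== LEMMAS AND PROOFS =====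

-- A's reversed power-weighted sum over cs
def pvRevSum (cs : List Char) : Int :=
  ((PySem.List.enumerate cs.reverse 0).map (fun p => pvOrdVal p.2 * 26 ^ p.1.toNat)).sum

theorem pvRevSum_cons (c : Char) (cs : List Char) :
    pvRevSum (c :: cs) = pvRevSum cs + pvOrdVal c * 26 ^ cs.length := by
  simp [pvRevSum, PySem.List.enumerate_append, PySem.List.enumerate_cons]

theorem pvHorner (cs : List Char) (a : Int) :
    cs.foldl (fun a c => a * 26 + ((c.toNat : Int) - 65 + 1)) a
      = a * 26 ^ cs.length + pvRevSum cs := by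
  induction cs generalizing a with
  | nil => simp [pvRevSum]
  | cons c cs ih =>
    simp only [List.foldl_cons, ih, pvRevSum_cons, pvOrdVal, List.length_cons]
    ring

-- ===== VERDICT (by name: the statement is the Claim_ definition above) =====
theorem alpha_to_int_spec : Claim_equal_alpha_to_int := by
  intro l _
  show alpha_to_int l = alpha_to_int_alt l
  unfold alpha_to_int alpha_to_int_alt
  split_ifs with h1 h2
  · rfl
  · rfl
  · rw [pvHorner]
    simp [pvRevSum]
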